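-- pv_equiv track=rewrite | github.com/jsappl/advent-of-code | 2020/python/day_12.py | move_ferry_with
-- ===== SOURCE A (Python) =====
-- from typing import Tuple
--
-- def move_ferry_with(instructions: list) -> Tuple[int, int]:
--     """Navigate ferry according to navigation instructions."""
--     direction = 0
--     moves = {"N": 0, "S": 0, "E": 0, "W": 0}
--     for action, value in instructions:
--         if action == "F":
--             moves[["E", "N", "W", "S"][direction % 360 // 90]] += value
--             continue
--         try:  # move in specific direction
--             moves[action] += value
--         except KeyError:  # turn the ferry
--             direction += ((action == "L") - (action == "R")) * value  # turn
--     return moves["N"] - moves["S"], moves["E"] - moves["W"]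
-- ===== SOURCE B (Python) =====
-- def move_ferry_with(instructions):
--     """Navigate ferry according to navigation instructions."""
--     # Pass 1: heading in effect BEFORE each instruction.
--     headings = []
--     d = 0
--     for action, value in instructions:
--         headings.append(d)
--         if action == "L":
--             d += value
--         elif action == "R":
--             d -= value
--     # Pass 2: map each instruction to a displacement vector, then sum.
--     def contrib(inst, h):
--         action, value = inst
--         if action == "F":
--             action = ["E", "N", "W", "S"][h % 360 // 90]
--         return {"N": (value, 0), "S": (-value, 0),
--                 "E": (0, value), "W": (0, -value)}.get(action, (0, 0))
--     vectors = [contrib(inst, h) for inst, h in zip(instructions, headings)]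
--     return sum(v[0] for v in vectors), sum(v[1] for v in vectors)
-- ===== Notes on version B (the rewrite author's own statement) =====
-- stated objective: alternative
-- what changed: Replaces A's single-pass stateful simulation of a 4-key tally dict with a staged map-reduce: first compute the list of headings in effect before each instruction, then map every instruction to an independent (north,east) displacement vector and sum those vectors componentwise.
import Mathlib
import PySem

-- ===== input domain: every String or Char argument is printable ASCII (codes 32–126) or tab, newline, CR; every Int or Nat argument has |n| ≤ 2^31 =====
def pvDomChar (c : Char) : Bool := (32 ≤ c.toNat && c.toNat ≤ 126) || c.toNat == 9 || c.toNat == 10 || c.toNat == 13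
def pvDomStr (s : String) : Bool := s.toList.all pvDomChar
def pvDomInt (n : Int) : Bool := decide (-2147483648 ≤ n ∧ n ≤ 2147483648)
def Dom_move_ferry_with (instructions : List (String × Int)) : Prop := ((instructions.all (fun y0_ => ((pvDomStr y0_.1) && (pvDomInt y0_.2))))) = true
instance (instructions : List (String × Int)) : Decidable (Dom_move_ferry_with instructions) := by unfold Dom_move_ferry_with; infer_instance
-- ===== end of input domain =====

-- B replaces A's stateful one-pass dict simulation by a staged map-reduce (headings pass, then a sum of per-instruction vectors); same cost.

-- ===== PORT A =====
-- the dict {"N":0,"S":0,"E":0,"W":0} and the loop over instructions; `moves[action] += value`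
-- is get? then insert (KeyError ↦ the `none` branch, i.e. the turn case).
def mfLoopA : List (String × Int) → PySem.Dict String Int × Int → PySem.Dict String Int × Int
  | [], st => st
  | (action, value) :: rest, (moves, direction) =>
    if action == "F" then
      -- index `direction % 360 // 90` is always in range (0..3), so getD "" is never the fallback
      let key := ((PySem.List.pyGet? ["E", "N", "W", "S"]
        (PySem.Int.floordiv (PySem.Int.mod direction 360) 90)).getD "")
      match moves.get? key with
      | some v => mfLoopA rest (moves.insert key (v + value), direction)
      | none => mfLoopA rest (moves, direction)
    else
      match moves.get? action with
      | some v => mfLoopA rest (moves.insert action (v + value), direction)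
      | none =>
          mfLoopA rest (moves, direction +
            ((if action == "L" then (1 : Int) else 0) - (if action == "R" then (1 : Int) else 0)) * value)

def move_ferry_with (instructions : List (String × Int)) : Int × Int :=
  let st := mfLoopA instructions
    (PySem.Dict.mk [("N", (0 : Int)), ("S", 0), ("E", 0), ("W", 0)], 0)
  (st.1.getD "N" 0 - st.1.getD "S" 0, st.1.getD "E" 0 - st.1.getD "W" 0)

-- ===== PORT B =====
-- pass 1 of Source B: the heading in effect before each instruction
def mfHeadings : List (String × Int) → Int → List Int
  | [], _ => []
  | (action, value) :: rest, d =>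
    d :: mfHeadings rest
      (if action == "L" then d + value else if action == "R" then d - value else d)

-- Source B's `contrib`: one instruction (with its heading) ↦ its (north, east) displacement vector
def mfContrib (inst : String × Int) (h : Int) : Int × Int :=
  let value := inst.2
  let action := if inst.1 == "F" then
      ((PySem.List.pyGet? ["E", "N", "W", "S"]
        (PySem.Int.floordiv (PySem.Int.mod h 360) 90)).getD "")
    else inst.1
  (PySem.Dict.mk [("N", ((value : Int), (0 : Int))), ("S", (-value, 0)),
    ("E", (0, value)), ("W", (0, -value))]).getD action (0, 0)

def move_ferry_with_alt (instructions : List (String × Int)) : Int × Int :=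
  let vectors := (instructions.zip (mfHeadings instructions 0)).map (fun p => mfContrib p.1 p.2)
  ((vectors.map Prod.fst).sum, (vectors.map Prod.snd).sum)

-- ===== PRECONDITION & SPEC =====
def Spec_move_ferry_with (instructions : List (String × Int)) (out : Int × Int) : Prop := out = move_ferry_with_alt instructions
instance (instructions : List (String × Int)) (out : Int × Int) : Decidable (Spec_move_ferry_with instructions out) := by unfold Spec_move_ferry_with; infer_instance

-- ===== CLAIM =====
def Claim_equal_move_ferry_with : Prop := ∀ (instructions : List (String × Int)), Dom_move_ferry_with instructions → Spec_move_ferry_with instructions (move_ferry_with instructions)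

-- ===== LEMMAS AND PROOFS =====

theorem mfContrib_F (value h : Int) :
    mfContrib ("F", value) h =
      (PySem.Dict.mk [("N", ((value : Int), (0 : Int))), ("S", (-value, 0)),
        ("E", (0, value)), ("W", (0, -value))]).getD
        ((PySem.List.pyGet? ["E", "N", "W", "S"]
          (PySem.Int.floordiv (PySem.Int.mod h 360) 90)).getD "") (0, 0) := rfl

theorem mf_main : ∀ (instrs : List (String × Int)) (n s e w dir : Int),
    (let st := mfLoopA instrs (PySem.Dict.mk [("N", n), ("S", s), ("E", e), ("W", w)], dir)
     (st.1.getD "N" 0 - st.1.getD "S" 0, st.1.getD "E" 0 - st.1.getD "W" 0))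
    = (let vs := (instrs.zip (mfHeadings instrs dir)).map (fun p => mfContrib p.1 p.2)
       (n - s + (vs.map Prod.fst).sum, e - w + (vs.map Prod.snd).sum)) := by
  intro instrs
  induction instrs with
  | nil =>
    intro n s e w dir
    simp [mfLoopA, mfHeadings, PySem.Dict.getD, PySem.Dict.get?_mk_cons]
  | cons hd rest ih =>
    obtain ⟨action, value⟩ := hd
    intro n s e w dir
    by_cases hF : action = "F"
    · subst hF
      have hm0 : 0 ≤ PySem.Int.mod dir 360 := PySem.Int.mod_nonneg dir (by norm_num)
      have hm1 : PySem.Int.mod dir 360 < 360 := PySem.Int.mod_lt dir (by norm_num)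
      rw [show mfHeadings (("F", value) :: rest) dir = dir :: mfHeadings rest dir from by
        simp [mfHeadings]]
      simp only [List.zip_cons_cons, List.map_cons, mfLoopA, BEq.rfl, if_true]
      obtain ⟨q, hfd, hq0, hq3⟩ :
          ∃ q : Int, PySem.Int.floordiv (PySem.Int.mod dir 360) 90 = q ∧ 0 ≤ q ∧ q ≤ 3 := by
        refine ⟨_, rfl, ?_, ?_⟩ <;>
        · rw [PySem.Int.floordiv_eq_ediv_of_pos (by norm_num)]; omega
      rw [hfd]
      interval_cases q
      · rw [mfContrib_F, hfd,
          show PySem.List.pyGet? ["E", "N", "W", "S"] (0 : Int) = some "E" from by decide]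
        simp only [Option.getD_some,
          show (PySem.Dict.mk [("N", n), ("S", s), ("E", e), ("W", w)]).get? "E" = some e from by
            simp [PySem.Dict.get?_mk_cons],
          show ∀ v : Int, (PySem.Dict.mk [("N", ((v:Int),(0:Int))), ("S", (-v,0)), ("E", (0,v)), ("W", (0,-v))]).getD "E" (0,0) = ((0:Int), v) from fun v => by
            simp [PySem.Dict.getD, PySem.Dict.get?_mk_cons]]
        rw [show (PySem.Dict.mk [("N", n), ("S", s), ("E", e), ("W", w)]).insert "E" _
          = PySem.Dict.mk [("N", n), ("S", s), ("E", e + value), ("W", w)] from rfl]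
        rw [ih n s (e + value) w dir]
        simp only [List.sum_cons, Prod.mk.injEq]
        constructor <;> ring
      · rw [mfContrib_F, hfd,
          show PySem.List.pyGet? ["E", "N", "W", "S"] (1 : Int) = some "N" from by decide]
        simp only [Option.getD_some,
          show (PySem.Dict.mk [("N", n), ("S", s), ("E", e), ("W", w)]).get? "N" = some n from by
            simp [PySem.Dict.get?_mk_cons],
          show ∀ v : Int, (PySem.Dict.mk [("N", ((v:Int),(0:Int))), ("S", (-v,0)), ("E", (0,v)), ("W", (0,-v))]).getD "N" (0,0) = (v, (0:Int)) from fun v => by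
            simp [PySem.Dict.getD, PySem.Dict.get?_mk_cons]]
        rw [show (PySem.Dict.mk [("N", n), ("S", s), ("E", e), ("W", w)]).insert "N" _
          = PySem.Dict.mk [("N", n + value), ("S", s), ("E", e), ("W", w)] from rfl]
        rw [ih (n + value) s e w dir]
        simp only [List.sum_cons, Prod.mk.injEq]
        constructor <;> ring
      · rw [mfContrib_F, hfd,
          show PySem.List.pyGet? ["E", "N", "W", "S"] (2 : Int) = some "W" from by decide]
        simp only [Option.getD_some,
          show (PySem.Dict.mk [("N", n), ("S", s), ("E", e), ("W", w)]).get? "W" = some w from by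
            simp [PySem.Dict.get?_mk_cons],
          show ∀ v : Int, (PySem.Dict.mk [("N", ((v:Int),(0:Int))), ("S", (-v,0)), ("E", (0,v)), ("W", (0,-v))]).getD "W" (0,0) = ((0:Int), -v) from fun v => by
            simp [PySem.Dict.getD, PySem.Dict.get?_mk_cons]]
        rw [show (PySem.Dict.mk [("N", n), ("S", s), ("E", e), ("W", w)]).insert "W" _
          = PySem.Dict.mk [("N", n), ("S", s), ("E", e), ("W", w + value)] from rfl]
        rw [ih n s e (w + value) dir]
        simp only [List.sum_cons, Prod.mk.injEq]
        constructor <;> ring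
      · rw [mfContrib_F, hfd,
          show PySem.List.pyGet? ["E", "N", "W", "S"] (3 : Int) = some "S" from by decide]
        simp only [Option.getD_some,
          show (PySem.Dict.mk [("N", n), ("S", s), ("E", e), ("W", w)]).get? "S" = some s from by
            simp [PySem.Dict.get?_mk_cons],
          show ∀ v : Int, (PySem.Dict.mk [("N", ((v:Int),(0:Int))), ("S", (-v,0)), ("E", (0,v)), ("W", (0,-v))]).getD "S" (0,0) = (-v, (0:Int)) from fun v => by
            simp [PySem.Dict.getD, PySem.Dict.get?_mk_cons]]
        rw [show (PySem.Dict.mk [("N", n), ("S", s), ("E", e), ("W", w)]).insert "S" _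
          = PySem.Dict.mk [("N", n), ("S", s + value), ("E", e), ("W", w)] from rfl]
        rw [ih n (s + value) e w dir]
        simp only [List.sum_cons, Prod.mk.injEq]
        constructor <;> ring
    · have hFb : (action == "F") = false := by simp [hF]
      by_cases hN : action = "N"
      · subst hN
        rw [show mfHeadings (("N", value) :: rest) dir = dir :: mfHeadings rest dir from by
          simp [mfHeadings]]
        simp only [List.zip_cons_cons, List.map_cons, mfLoopA, hFb, Bool.false_eq_true, if_false]
        simp only [show (PySem.Dict.mk [("N", n), ("S", s), ("E", e), ("W", w)]).get? "N" = some n from by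
            simp [PySem.Dict.get?_mk_cons],
          show mfContrib ("N", value) dir = (value, (0:Int)) from by
            simp [mfContrib, PySem.Dict.getD, PySem.Dict.get?_mk_cons]]
        rw [show (PySem.Dict.mk [("N", n), ("S", s), ("E", e), ("W", w)]).insert "N" _
          = PySem.Dict.mk [("N", n + value), ("S", s), ("E", e), ("W", w)] from rfl]
        rw [ih (n + value) s e w dir]
        simp only [List.sum_cons, Prod.mk.injEq]
        constructor <;> ring
      by_cases hS : action = "S"
      · subst hS
        rw [show mfHeadings (("S", value) :: rest) dir = dir :: mfHeadings rest dir from by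
          simp [mfHeadings]]
        simp only [List.zip_cons_cons, List.map_cons, mfLoopA, hFb, Bool.false_eq_true, if_false]
        simp only [show (PySem.Dict.mk [("N", n), ("S", s), ("E", e), ("W", w)]).get? "S" = some s from by
            simp [PySem.Dict.get?_mk_cons],
          show mfContrib ("S", value) dir = (-value, (0:Int)) from by
            simp [mfContrib, PySem.Dict.getD, PySem.Dict.get?_mk_cons]]
        rw [show (PySem.Dict.mk [("N", n), ("S", s), ("E", e), ("W", w)]).insert "S" _
          = PySem.Dict.mk [("N", n), ("S", s + value), ("E", e), ("W", w)] from rfl]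
        rw [ih n (s + value) e w dir]
        simp only [List.sum_cons, Prod.mk.injEq]
        constructor <;> ring
      by_cases hE : action = "E"
      · subst hE
        rw [show mfHeadings (("E", value) :: rest) dir = dir :: mfHeadings rest dir from by
          simp [mfHeadings]]
        simp only [List.zip_cons_cons, List.map_cons, mfLoopA, hFb, Bool.false_eq_true, if_false]
        simp only [show (PySem.Dict.mk [("N", n), ("S", s), ("E", e), ("W", w)]).get? "E" = some e from by
            simp [PySem.Dict.get?_mk_cons],
          show mfContrib ("E", value) dir = ((0:Int), value) from by
            simp [mfContrib, PySem.Dict.getD, PySem.Dict.get?_mk_cons]]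
        rw [show (PySem.Dict.mk [("N", n), ("S", s), ("E", e), ("W", w)]).insert "E" _
          = PySem.Dict.mk [("N", n), ("S", s), ("E", e + value), ("W", w)] from rfl]
        rw [ih n s (e + value) w dir]
        simp only [List.sum_cons, Prod.mk.injEq]
        constructor <;> ring
      by_cases hW : action = "W"
      · subst hW
        rw [show mfHeadings (("W", value) :: rest) dir = dir :: mfHeadings rest dir from by
          simp [mfHeadings]]
        simp only [List.zip_cons_cons, List.map_cons, mfLoopA, hFb, Bool.false_eq_true, if_false]
        simp only [show (PySem.Dict.mk [("N", n), ("S", s), ("E", e), ("W", w)]).get? "W" = some w from by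
            simp [PySem.Dict.get?_mk_cons],
          show mfContrib ("W", value) dir = ((0:Int), -value) from by
            simp [mfContrib, PySem.Dict.getD, PySem.Dict.get?_mk_cons]]
        rw [show (PySem.Dict.mk [("N", n), ("S", s), ("E", e), ("W", w)]).insert "W" _
          = PySem.Dict.mk [("N", n), ("S", s), ("E", e), ("W", w + value)] from rfl]
        rw [ih n s e (w + value) dir]
        simp only [List.sum_cons, Prod.mk.injEq]
        constructor <;> ring
      have hga : (PySem.Dict.mk [("N", n), ("S", s), ("E", e), ("W", w)]).get? action = none := by
        simp [PySem.Dict.get?, Ne.symm hN, Ne.symm hS, Ne.symm hE, Ne.symm hW]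
      have hc : mfContrib (action, value) dir = ((0 : Int), (0 : Int)) := by
        simp [mfContrib, hFb, PySem.Dict.getD, PySem.Dict.get?, Ne.symm hN, Ne.symm hS, Ne.symm hE, Ne.symm hW]
      by_cases hL : action = "L"
      · subst hL
        rw [show mfHeadings (("L", value) :: rest) dir = dir :: mfHeadings rest (dir + value) from by
          simp [mfHeadings]]
        simp only [List.zip_cons_cons, List.map_cons, mfLoopA, hFb, Bool.false_eq_true, if_false, hga,
          BEq.rfl, if_true, show (("L" : String) == "R") = false from by decide]
        rw [show dir + ((1 : Int) - 0) * value = dir + value from by ring]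
        rw [ih n s e w (dir + value), hc]
        simp
      · by_cases hR : action = "R"
        · subst hR
          rw [show mfHeadings (("R", value) :: rest) dir = dir :: mfHeadings rest (dir - value) from by
            simp [mfHeadings]]
          simp only [List.zip_cons_cons, List.map_cons, mfLoopA, hFb, Bool.false_eq_true, if_false, hga,
            BEq.rfl, if_true, show (("R" : String) == "L") = false from by decide]
          rw [show dir + ((0 : Int) - 1) * value = dir - value from by ring]
          rw [ih n s e w (dir - value), hc]
          simp
        · have hLb : (action == "L") = false := by simp [hL]
          have hRb : (action == "R") = false := by simp [hR]
          rw [show mfHeadings ((action, value) :: rest) dir = dir :: mfHeadings rest dir from by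
            simp [mfHeadings, hLb, hRb]]
          simp only [List.zip_cons_cons, List.map_cons, mfLoopA, hFb, hLb, hRb,
            Bool.false_eq_true, if_false, hga]
          rw [show dir + ((0 : Int) - 0) * value = dir from by ring]
          rw [ih n s e w dir, hc]
          simp

-- ===== VERDICT =====
theorem move_ferry_with_spec : Claim_equal_move_ferry_with := by
  intro instructions _
  unfold Spec_move_ferry_with move_ferry_with move_ferry_with_alt
  simpa using mf_main instructions 0 0 0 0 0
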